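-- pv_equiv track=rewrite | github.com/mmaani/zomorod-website | scripts/zomorod_autofill_supplier_intelligence.py | map_categories
-- ===== SOURCE A (Python) =====
-- from typing import Dict, List, Tuple
--
-- def map_categories(text: str, keyword_map: Dict[str, List[str]]) -> Tuple[str, str]:
--     t = (text or "").lower()
--     hits = []
--     for cat, kws in keyword_map.items():
--         score = sum(1 for k in kws if k in t)
--         if score > 0:
--             hits.append((cat, score))
--     if not hits:
--         return ("", "")
--     hits.sort(key=lambda x: x[1], reverse=True)
--     primary = hits[0][0]
--     secondary = ", ".join([c for c, _ in hits[1:]])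
--     return (primary, secondary)
-- ===== SOURCE B (Python) =====
-- from typing import Dict, List, Tuple
--
-- def map_categories(text: str, keyword_map: Dict[str, List[str]]) -> Tuple[str, str]:
--     t = (text or "").lower()
--     hits = []
--     for cat, kws in keyword_map.items():
--         n = 0
--         for k in kws:
--             if k in t:
--                 n += 1
--         if n > 0:
--             hits.append((cat, n))
--     # selection ranking: repeatedly extract the first highest-scoring hit,
--     # instead of sorting the whole list and slicing
--     ranked = []
--     while hits:
--         best = hits[0]
--         for h in hits[1:]:
--             if h[1] > best[1]:
--                 best = h
--         ranked.append(best[0])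
--         hits.remove(best)
--     if not ranked:
--         return ("", "")
--     return (ranked[0], ", ".join(ranked[1:]))
-- ===== Notes on version B (the rewrite author's own statement) =====
-- stated objective: alternative
-- what changed: B replaces A's full stable sort of the hit list plus slicing by a selection loop that repeatedly extracts the first highest-scoring hit (and counts keyword matches with an explicit accumulator instead of a generator sum).
import Mathlib
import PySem

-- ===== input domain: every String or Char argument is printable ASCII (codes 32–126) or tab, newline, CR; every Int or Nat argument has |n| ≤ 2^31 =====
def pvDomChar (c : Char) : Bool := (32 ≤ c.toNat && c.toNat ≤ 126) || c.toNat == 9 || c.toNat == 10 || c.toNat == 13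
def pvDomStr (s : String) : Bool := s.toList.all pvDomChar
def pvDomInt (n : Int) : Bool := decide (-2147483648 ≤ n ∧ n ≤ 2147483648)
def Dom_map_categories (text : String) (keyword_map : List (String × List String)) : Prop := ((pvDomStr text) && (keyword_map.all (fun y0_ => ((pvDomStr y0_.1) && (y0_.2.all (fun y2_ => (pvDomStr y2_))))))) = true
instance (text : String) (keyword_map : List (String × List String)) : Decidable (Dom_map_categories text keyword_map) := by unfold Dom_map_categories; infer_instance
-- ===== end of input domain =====

-- B replaces A's full stable sort + slicing by selection ranking (repeatedly extract the
-- first highest-scoring hit); objective: alternative algorithm, same observable result.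

-- ===== PORT A =====
def map_categories (text : String) (keyword_map : List (String × List String)) : String × String :=
  -- t = (text or "").lower()
  let t := PySem.Str.lower (if text == "" then "" else text)
  -- for cat, kws in keyword_map.items(): score = sum(1 for k in kws if k in t); if score > 0: hits.append((cat, score))
  let hits : List (String × Int) := keyword_map.foldl (fun acc p =>
      let score : Int := (p.2.map (fun k => if PySem.Str.isIn k t then (1 : Int) else 0)).sum
      if score > 0 then acc ++ [(p.1, score)] else acc) []
  if hits = [] then ("", "")
  else
    -- hits.sort(key=lambda x: x[1], reverse=True)
    let s := PySem.List.sorted hits (fun x => x.2) true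
    -- hits[0][0]  (guarded nonempty, so the default is never used)
    let primary := (PySem.List.pyGetD s 0 ("", 0)).1
    -- ", ".join([c for c, _ in hits[1:]])
    let secondary := PySem.Str.join ", " ((PySem.List.slice s (some 1) none).map (fun c => c.1))
    (primary, secondary)

-- ===== PORT B =====
-- best = hits[0]; for h in hits[1:]: if h[1] > best[1]: best = h
def pvBestOf (x : String × Int) (t : List (String × Int)) : String × Int :=
  t.foldl (fun b h => if b.2 < h.2 then h else b) x

theorem pvBestOf_mem (x : String × Int) (t : List (String × Int)) : pvBestOf x t ∈ x :: t := by
  induction t generalizing x with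
  | nil => simp [pvBestOf]
  | cons y r ih =>
    have hdef : pvBestOf x (y :: r) = pvBestOf (if x.2 < y.2 then y else x) r := rfl
    rw [hdef]
    rcases List.mem_cons.1 (ih (if x.2 < y.2 then y else x)) with h | h
    · rw [h]; split_ifs <;> simp
    · simp [h]


-- while hits: … ranked.append(best[0]); hits.remove(best)
-- hits.remove(best) is exact as List.erase here: best ∈ hits (pvBestOf_mem), so no ValueError
def pvRankSel : List (String × Int) → List String
  | [] => []
  | h :: t =>
    let b := pvBestOf h t
    b.1 :: pvRankSel ((h :: t).erase b)
termination_by l => l.length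
decreasing_by
  have hm := pvBestOf_mem h t
  have := List.length_erase_of_mem hm
  simp only [this, List.length_cons]
  omega


def map_categories_alt (text : String) (keyword_map : List (String × List String)) : String × String :=
  let t := PySem.Str.lower (if text == "" then "" else text)
  -- n = 0; for k in kws: if k in t: n += 1
  let hits : List (String × Int) := keyword_map.foldl (fun acc p =>
      let n := p.2.foldl (fun n k => if PySem.Str.isIn k t then n + 1 else n) (0 : Int)
      if n > 0 then acc ++ [(p.1, n)] else acc) []
  let ranked := pvRankSel hits
  if ranked = [] then ("", "")
  else (PySem.List.pyGetD ranked 0 "", PySem.Str.join ", " (PySem.List.slice ranked (some 1) none))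

-- ===== PRECONDITION & SPEC =====
-- Pre_ excludes association lists with duplicate keys: they do not represent a Python dict
-- (dict construction collapses them), so the ports' direct list iteration would not model A's
-- iteration over keyword_map.items(); a real call of A never sees such an input.
def Pre_map_categories (text : String) (keyword_map : List (String × List String)) : Prop :=
  (keyword_map.map Prod.fst).Nodup
instance (text : String) (keyword_map : List (String × List String)) : Decidable (Pre_map_categories text keyword_map) := by unfold Pre_map_categories; infer_instance

def pvWitness_map_categories : String × (List (String × List String)) :=
  ("apple pie", [("fruit", ["apple", "kiwi"]), ("dessert", ["pie"])])

def Spec_map_categories (text : String) (keyword_map : List (String × List String)) (out : String × String) : Prop := out = map_categories_alt text keyword_map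
instance (text : String) (keyword_map : List (String × List String)) (out : String × String) : Decidable (Spec_map_categories text keyword_map out) := by unfold Spec_map_categories; infer_instance

-- ===== CLAIM (what is proved, stated in full; the proofs are below) =====
def Claim_equal_map_categories : Prop := ∀ (text : String) (keyword_map : List (String × List String)), Dom_map_categories text keyword_map → Pre_map_categories text keyword_map → Spec_map_categories text keyword_map (map_categories text keyword_map)

-- ===== LEMMAS AND PROOFS =====

-- A's generator sum and B's counting loop agree
theorem pv_score_eq (c : String → Bool) (kws : List String) :
    kws.foldl (fun n k => if c k then n + 1 else n) (0 : Int)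
      = (kws.map (fun k => if c k then (1 : Int) else 0)).sum := by
  rw [PySem.List.foldl_count_if, PySem.List.sum_map_ite_one_zero]; simp

-- the two ports build the same hits list
theorem pv_hits_eq (t : String) (km : List (String × List String)) :
    km.foldl (fun acc p =>
        let score : Int := (p.2.map (fun k => if PySem.Str.isIn k t then (1 : Int) else 0)).sum
        if score > 0 then acc ++ [(p.1, score)] else acc) ([] : List (String × Int))
      = km.foldl (fun acc p =>
        let n := p.2.foldl (fun n k => if PySem.Str.isIn k t then n + 1 else n) (0 : Int)
        if n > 0 then acc ++ [(p.1, n)] else acc) [] := by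
  have hfun : (fun (acc : List (String × Int)) (p : String × List String) =>
      let score : Int := (p.2.map (fun k => if PySem.Str.isIn k t then (1 : Int) else 0)).sum
      if score > 0 then acc ++ [(p.1, score)] else acc)
    = (fun acc p =>
      let n := p.2.foldl (fun n k => if PySem.Str.isIn k t then n + 1 else n) (0 : Int)
      if n > 0 then acc ++ [(p.1, n)] else acc) := by
    funext acc p
    simp only [pv_score_eq (fun k => PySem.Str.isIn k t) p.2]
  rw [hfun]

def pvInsL (z : String × Int) (acc : List (String × Int)) : List (String × Int) :=
  PySem.List.insertBy (fun a b => decide (b.2 < a.2)) z acc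
def pvInsLE (x : String × Int) (acc : List (String × Int)) : List (String × Int) :=
  PySem.List.insertBy (fun a b => decide (b.2 ≤ a.2)) x acc

theorem pvInsL_nil (z : String × Int) : pvInsL z [] = [z] := rfl
theorem pvInsLE_nil (x : String × Int) : pvInsLE x [] = [x] := rfl
theorem pvInsL_cons (z y : String × Int) (ys : List (String × Int)) :
    pvInsL z (y :: ys) = if y.2 < z.2 then z :: y :: ys else y :: pvInsL z ys := by
  simp [pvInsL, PySem.List.insertBy]
theorem pvInsLE_cons (x y : String × Int) (ys : List (String × Int)) :
    pvInsLE x (y :: ys) = if y.2 ≤ x.2 then x :: y :: ys else y :: pvInsLE x ys := by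
  simp [pvInsLE, PySem.List.insertBy]

theorem pv_comm (acc : List (String × Int)) (z x : String × Int) :
    pvInsL z (pvInsLE x acc) = pvInsLE x (pvInsL z acc) := by
  induction acc with
  | nil =>
    rw [pvInsL_nil, pvInsLE_nil, pvInsL_cons, pvInsLE_cons, pvInsL_nil, pvInsLE_nil]
    split_ifs <;> (first | rfl | omega)
  | cons y ys ih =>
    rw [pvInsL_cons, pvInsLE_cons]
    by_cases hxy : y.2 ≤ x.2
    · by_cases hzy : y.2 < z.2
      · rw [if_pos hxy, if_pos hzy, pvInsL_cons, pvInsLE_cons, pvInsL_cons, pvInsLE_cons,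
          if_pos hzy, if_pos hxy]
        split_ifs <;> (first | rfl | omega)
      · have h1 : ¬ x.2 < z.2 := by omega
        rw [if_pos hxy, if_neg hzy, pvInsL_cons, if_neg h1, pvInsL_cons, if_neg hzy,
          pvInsLE_cons, if_pos hxy]
    · by_cases hzy : y.2 < z.2
      · have h1 : ¬ z.2 ≤ x.2 := by omega
        rw [if_neg hxy, if_pos hzy, pvInsL_cons, if_pos hzy, pvInsLE_cons, if_neg h1,
          pvInsLE_cons, if_neg hxy]
      · rw [if_neg hxy, if_neg hzy, pvInsL_cons, if_neg hzy, pvInsLE_cons, if_neg hxy, ih]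

theorem pv_foldl_comm (xs : List (String × Int)) (acc : List (String × Int)) (x : String × Int) :
    xs.foldl (fun a z => pvInsL z a) (pvInsLE x acc)
      = pvInsLE x (xs.foldl (fun a z => pvInsL z a) acc) := by
  induction xs generalizing acc with
  | nil => rfl
  | cons z zs ih => simp only [List.foldl_cons, pv_comm, ih]

theorem pv_sorted_cons (x : String × Int) (xs : List (String × Int)) :
    PySem.List.sorted (x :: xs) (fun p => p.2) true
      = pvInsLE x (PySem.List.sorted xs (fun p => p.2) true) := by
  rw [PySem.List.sorted_rev_eq_foldl_insertBy, PySem.List.sorted_rev_eq_foldl_insertBy]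
  have h : (fun (acc : List (String × Int)) (w : String × Int) =>
      PySem.List.insertBy (fun a b => decide (b.2 < a.2)) w acc)
      = fun a z => pvInsL z a := rfl
  rw [List.foldl_cons, h]
  have h2 : PySem.List.insertBy (fun a b => decide ((b.2:Int) < a.2)) x ([] : List (String × Int))
      = pvInsLE x [] := rfl
  rw [h2, pv_foldl_comm]

theorem pv_insLE_front (b : String × Int) (s : List (String × Int))
    (h : ∀ z ∈ s, z.2 ≤ b.2) : pvInsLE b s = b :: s := by
  cases s with
  | nil => rfl
  | cons y ys => rw [pvInsLE_cons, if_pos (h y (by simp))]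

theorem pv_insLE_skip (a b : String × Int) (s : List (String × Int)) (h : a.2 < b.2) :
    pvInsLE a (b :: s) = b :: pvInsLE a s := by
  rw [pvInsLE_cons, if_neg (by omega)]

theorem pv_bestOf_decomp (x : String × Int) (t : List (String × Int)) :
    ∃ l1 l2, x :: t = l1 ++ pvBestOf x t :: l2
      ∧ (∀ z ∈ l1, z.2 < (pvBestOf x t).2)
      ∧ (∀ z ∈ x :: t, z.2 ≤ (pvBestOf x t).2) := by
  induction t generalizing x with
  | nil => exact ⟨[], [], by simp [pvBestOf], by simp, by simp [pvBestOf]⟩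
  | cons y r ih =>
    have hdef : pvBestOf x (y :: r) = pvBestOf (if x.2 < y.2 then y else x) r := rfl
    by_cases hxy : x.2 < y.2
    · rcases ih y with ⟨l1, l2, hdec, hlt, hle⟩
      rw [hdef, if_pos hxy]
      have hy := hle y (by simp)
      refine ⟨x :: l1, l2, by simp [hdec], ?_, ?_⟩
      · intro z hz
        rcases List.mem_cons.1 hz with rfl | hz
        · omega
        · exact hlt z hz
      · intro z hz
        rcases List.mem_cons.1 hz with rfl | hz
        · omega
        · exact hle z hz
    · rcases ih x with ⟨l1, l2, hdec, hlt, hle⟩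
      rw [hdef, if_neg hxy]
      have hyle : y.2 ≤ (pvBestOf x r).2 := le_trans (by omega) (hle x (by simp))
      cases l1 with
      | nil =>
        simp only [List.nil_append] at hdec
        obtain ⟨hb', hl2'⟩ := List.cons.inj hdec
        have hb : pvBestOf x r = x := hb'.symm
        have hl2 : l2 = r := hl2'.symm
        refine ⟨[], y :: r, by simp [hb], by simp, ?_⟩
        intro z hz
        rcases List.mem_cons.1 hz with rfl | hz
        · exact hle z (by simp)
        rcases List.mem_cons.1 hz with rfl | hz
        · exact hyle
        · exact hle z (by simp [hz])
      | cons a l1' =>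
        obtain ⟨hax', hr⟩ := List.cons.inj hdec
        have hax : a = x := hax'.symm
        have hr2 : r = l1' ++ pvBestOf x r :: l2 := by simpa using hr
        have hxlt : x.2 < (pvBestOf x r).2 := hax ▸ hlt a (by simp)
        refine ⟨x :: y :: l1', l2, by rw [List.cons_append, List.cons_append, ← hr2], ?_, ?_⟩
        · intro z hz
          rcases List.mem_cons.1 hz with rfl | hz
          · exact hxlt
          rcases List.mem_cons.1 hz with rfl | hz
          · omega
          · exact hlt z (by simp [hax, hz])
        · intro z hz
          rcases List.mem_cons.1 hz with rfl | hz
          · exact hle z (by simp)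
          rcases List.mem_cons.1 hz with rfl | hz
          · exact hyle
          · exact hle z (by simp [hz])

theorem pvRankSel_nil : pvRankSel [] = [] := by rw [pvRankSel]
theorem pvRankSel_cons (h : String × Int) (t : List (String × Int)) :
    pvRankSel (h :: t) = (pvBestOf h t).1 :: pvRankSel ((h :: t).erase (pvBestOf h t)) := by
  rw [pvRankSel]

theorem pv_sorted_decomp (l1 : List (String × Int)) (b : String × Int) (l2 : List (String × Int))
    (hlt : ∀ z ∈ l1, z.2 < b.2) (hle : ∀ z ∈ l1 ++ b :: l2, z.2 ≤ b.2) :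
    PySem.List.sorted (l1 ++ b :: l2) (fun p => p.2) true
      = b :: PySem.List.sorted (l1 ++ l2) (fun p => p.2) true := by
  induction l1 with
  | nil =>
    simp only [List.nil_append] at *
    rw [pv_sorted_cons]
    exact pv_insLE_front b _ (fun z hz =>
      hle z (List.mem_cons_of_mem _ ((PySem.List.mem_sorted _ _ _ _).1 hz)))
  | cons a l1 ih =>
    simp only [List.cons_append] at *
    rw [pv_sorted_cons, ih (fun z hz => hlt z (by simp [hz]))
        (fun z hz => hle z (by simp at hz ⊢; tauto)),
      pv_insLE_skip a b _ (hlt a (by simp)), ← pv_sorted_cons]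

theorem pv_erase_decomp (l1 : List (String × Int)) (b : String × Int) (l2 : List (String × Int))
    (hlt : ∀ z ∈ l1, z.2 < b.2) : (l1 ++ b :: l2).erase b = l1 ++ l2 := by
  have hnb : b ∉ l1 := fun h => by have := hlt b h; omega
  rw [List.erase_append_right _ hnb, List.erase_cons_head]

theorem pv_rank_eq : ∀ (n : Nat) (hits : List (String × Int)), hits.length ≤ n →
    pvRankSel hits = (PySem.List.sorted hits (fun p => p.2) true).map (fun c => c.1) := by
  intro n
  induction n with
  | zero =>
    intro hits h
    rw [List.length_eq_zero_iff.1 (Nat.le_zero.1 h), pvRankSel_nil]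
    rfl
  | succ n ih =>
    intro hits hlen
    cases hits with
    | nil => rw [pvRankSel_nil]; rfl
    | cons h t =>
      rcases pv_bestOf_decomp h t with ⟨l1, l2, hdec, hlt, hle⟩
      rw [pvRankSel_cons]
      have he : (h :: t).erase (pvBestOf h t) = l1 ++ l2 := by
        rw [hdec]; exact pv_erase_decomp l1 _ l2 hlt
      have hs : PySem.List.sorted (h :: t) (fun p => p.2) true
          = pvBestOf h t :: PySem.List.sorted (l1 ++ l2) (fun p => p.2) true := by
        rw [hdec]; exact pv_sorted_decomp l1 _ l2 hlt (by rw [← hdec]; exact hle)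
      have hlen' : (l1 ++ l2).length ≤ n := by
        have h2 : (h :: t).length = (l1 ++ (pvBestOf h t :: l2)).length := by rw [hdec]
        simp only [List.length_cons, List.length_append] at h2 hlen ⊢
        omega
      rw [he, hs, List.map_cons, ih _ hlen']

-- ===== VERDICT (by name: the statement is the Claim_ definition above) =====
theorem map_categories_spec : Claim_equal_map_categories := by
  unfold Claim_equal_map_categories
  intro text km _hdom _hpre
  unfold Spec_map_categories
  simp only [map_categories, map_categories_alt]
  rw [← pv_hits_eq]
  set t := PySem.Str.lower (if text == "" then "" else text) with ht
  set hits : List (String × Int) := km.foldl (fun acc p =>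
      let score : Int := (p.2.map (fun k => if PySem.Str.isIn k t then (1 : Int) else 0)).sum
      if score > 0 then acc ++ [(p.1, score)] else acc) [] with hh
  have hrank := pv_rank_eq hits.length hits (le_refl _)
  by_cases hnil : hits = []
  · simp [hnil, pvRankSel_nil]
  · have hsnil : PySem.List.sorted hits (fun p => p.2) true ≠ [] := by
      simpa [PySem.List.sorted_eq_nil_iff] using hnil
    have hrnil : pvRankSel hits ≠ [] := by
      rw [hrank]; simpa using hsnil
    rw [if_neg hnil, if_neg hrnil, hrank]
    cases hse : PySem.List.sorted hits (fun p => p.2) true with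
    | nil => exact absurd hse hsnil
    | cons c cs =>
      have h1 : PySem.List.slice (c :: cs) (some (1 : Int)) none = cs := by
        have := PySem.List.slice_from (c :: cs) (a := 1) (by norm_num)
        simpa using this
      have h2 : PySem.List.slice (c.1 :: List.map (fun c => c.1) cs) (some (1 : Int)) none
          = List.map (fun c => c.1) cs := by
        have := PySem.List.slice_from (c.1 :: List.map (fun c => c.1) cs) (a := 1) (by norm_num)
        simpa using this
      simp [hse, h1, h2, PySem.List.pyGetD, PySem.List.pyIdx?, PySem.List.pyGet?]
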